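-- pv_equiv track=rewrite | github.com/bluesky0906/Google-STEP | class01/python/exercise2a.py | string_combination_solution
-- ===== SOURCE A (Python) =====
-- def consider_qu (input_string, anagrams):
--     input_q = input_string.count('q')
--     input_u = input_string.count('u')
--     if input_q <= 0 :
--         return anagrams
--
--     considerd_anagram = [anagram for anagram in anagrams if (anagram.count('u') - anagram.count('q')) <= (input_u - input_q)]
--
--     return considerd_anagram
--
-- def string_combination_solution(s, dic):
--     candidates = ['']
--     anagrams = []
--     for c in s:
--         current_candidates = candidates.copy()
--         for prev in current_candidates:
--             new_candidates = prev + c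
--             if new_candidates in dic :
--                 anagrams.append(dic[new_candidates])
--             candidates.append(new_candidates)
--
--     # quについての条件を満たさない場合は消す
--     considerd_anagrams = consider_qu(s, anagrams)
--     return considerd_anagrams
-- ===== SOURCE B (Python) =====
-- def string_combination_solution(s, dic):
--     n = len(s)
--     anagrams = []
--     for mask in range(1, 2 ** n):
--         m = mask
--         chars = []
--         for c in s:
--             if m % 2 == 1:
--                 chars.append(c)
--             m //= 2
--         sub = ''.join(chars)
--         if sub in dic:
--             anagrams.append(dic[sub])
--     q = s.count('q')
--     u = s.count('u')
--     if q <= 0: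
--         return anagrams
--     return [a for a in anagrams if a.count('u') - a.count('q') <= u - q]
-- ===== Notes on version B (the rewrite author's own statement) =====
-- stated objective: alternative
-- what changed: Replaces A's ever-growing candidates list (snapshot-and-extend inner loop over all previous subsequences) with direct bitmask enumeration: each mask in range(1, 2**n) is decoded bit-by-bit into its subsequence, so no candidate list is stored; the q/u filter is inlined.
import Mathlib
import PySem

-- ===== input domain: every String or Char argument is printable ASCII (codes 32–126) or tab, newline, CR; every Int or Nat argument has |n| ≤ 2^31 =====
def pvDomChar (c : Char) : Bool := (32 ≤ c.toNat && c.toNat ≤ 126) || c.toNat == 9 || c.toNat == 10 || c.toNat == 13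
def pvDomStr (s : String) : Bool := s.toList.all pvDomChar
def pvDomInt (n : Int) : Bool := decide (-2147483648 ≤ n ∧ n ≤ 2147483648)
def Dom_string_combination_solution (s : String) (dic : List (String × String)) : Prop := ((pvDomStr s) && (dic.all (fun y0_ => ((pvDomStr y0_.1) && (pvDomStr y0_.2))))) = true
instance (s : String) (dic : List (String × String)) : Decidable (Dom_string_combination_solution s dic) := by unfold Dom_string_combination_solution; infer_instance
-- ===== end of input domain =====

-- B replaces A's growing candidates list with bitmask subset enumeration (same order, no stored candidates); equivalence of the return values is proved on all inputs.

-- ===== PORT A =====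
def consider_qu (input_string : String) (anagrams : List String) : List String :=
  let input_q : Int := (PySem.Str.count input_string "q" : Int)
  let input_u : Int := (PySem.Str.count input_string "u" : Int)
  if input_q ≤ 0 then anagrams
  else anagrams.filter (fun anagram =>
    decide ((PySem.Str.count anagram "u" : Int) - (PySem.Str.count anagram "q" : Int) ≤ input_u - input_q))

def string_combination_solution (s : String) (dic : List (String × String)) : List String :=
  -- candidates = ['']; anagrams = []; nested loops appending to both
  let st := s.toList.foldl (fun (st : List String × List String) c =>
      let current_candidates := st.1
      current_candidates.foldl (fun (st2 : List String × List String) prev =>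
        let new_candidates := String.ofList (prev.toList ++ [c])   -- prev + c
        let an2 := match List.lookup new_candidates dic with   -- 'in dic' / 'dic[...]' (first match)
          | some v => st2.2 ++ [v]
          | none => st2.2
        (st2.1 ++ [new_candidates], an2)) st)
    ([""], [])
  consider_qu s st.2

-- ===== PORT B =====
def string_combination_solution_alt (s : String) (dic : List (String × String)) : List String :=
  let n := s.toList.length
  let anagrams := (PySem.List.pyRange 1 ((2 : Int) ^ n) 1).foldl (fun (acc : List String) mask =>
      -- decode mask bit by bit while walking the characters of s
      let p := s.toList.foldl (fun (st : Int × List Char) c =>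
          (PySem.Int.floordiv st.1 2,
           if PySem.Int.mod st.1 2 == 1 then st.2 ++ [c] else st.2))
        (mask, ([] : List Char))
      let sub := String.ofList p.2
      match List.lookup sub dic with
      | some v => acc ++ [v]
      | none => acc) []
  let q : Int := (PySem.Str.count s "q" : Int)
  let u : Int := (PySem.Str.count s "u" : Int)
  if q ≤ 0 then anagrams
  else anagrams.filter (fun a =>
    decide ((PySem.Str.count a "u" : Int) - (PySem.Str.count a "q" : Int) ≤ u - q))

-- ===== PRECONDITION & SPEC =====
def Spec_string_combination_solution (s : String) (dic : List (String × String)) (out : List String) : Prop := out = string_combination_solution_alt s dic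
instance (s : String) (dic : List (String × String)) (out : List String) : Decidable (Spec_string_combination_solution s dic out) := by unfold Spec_string_combination_solution; infer_instance

-- ===== CLAIM (what is proved, stated in full; the proofs are below) =====
def Claim_equal_string_combination_solution : Prop := ∀ (s : String) (dic : List (String × String)), Dom_string_combination_solution s dic → Spec_string_combination_solution s dic (string_combination_solution s dic)

-- ===== LEMMAS AND PROOFS =====

-- the subsequence of cs selected by the bits of m (LSB = first char)
def bitsSub : List Char → Nat → List Char
  | [], _ => []
  | c :: cs, m => (if m % 2 = 1 then [c] else []) ++ bitsSub cs (m / 2)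

theorem bitsSub_append_lt (cs : List Char) (c : Char) (m : Nat) (h : m < 2 ^ cs.length) :
    bitsSub (cs ++ [c]) m = bitsSub cs m := by
  induction cs generalizing m with
  | nil =>
    have hm : m = 0 := by simpa using h
    subst hm
    simp [bitsSub]
  | cons a cs ih =>
    have hp : 2 ^ (a :: cs).length = 2 * 2 ^ cs.length := by
      simp [List.length_cons, pow_succ]; ring
    rw [hp] at h
    simp only [List.cons_append, bitsSub]
    rw [ih (m / 2) (by omega)]

theorem bitsSub_append_add (cs : List Char) (c : Char) (m : Nat) (h : m < 2 ^ cs.length) :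
    bitsSub (cs ++ [c]) (2 ^ cs.length + m) = bitsSub cs m ++ [c] := by
  induction cs generalizing m with
  | nil =>
    have hm : m = 0 := by simpa using h
    subst hm
    simp [bitsSub]
  | cons a cs ih =>
    have hp : 2 ^ (a :: cs).length = 2 * 2 ^ cs.length := by
      simp [List.length_cons, pow_succ]; ring
    rw [hp] at h ⊢
    simp only [List.cons_append, bitsSub]
    have h2 : (2 * 2 ^ cs.length + m) % 2 = m % 2 := by omega
    have h3 : (2 * 2 ^ cs.length + m) / 2 = 2 ^ cs.length + m / 2 := by omega
    rw [h2, h3, ih (m / 2) (by omega)]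
    simp

-- A's inner loop over the snapshot: appends all extended candidates and the found values
theorem innerA (dic : List (String × String)) (c : Char) (cur : List String)
    (cand an : List String) :
    cur.foldl (fun (st2 : List String × List String) prev =>
        (st2.1 ++ [prev ++ String.ofList [c]],
         match List.lookup (prev ++ String.ofList [c]) dic with
         | some v => st2.2 ++ [v]
         | none => st2.2)) (cand, an)
    = (cand ++ cur.map (fun prev => prev ++ String.ofList [c]),
       an ++ cur.filterMap (fun prev => List.lookup (prev ++ String.ofList [c]) dic)) := by
  induction cur generalizing cand an with
  | nil => simp
  | cons p ps ih =>
    simp only [List.foldl_cons]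
    cases h : List.lookup (p ++ String.ofList [c]) dic <;>
      simp [h, ih]

-- A's double loop builds exactly the bitmask-ordered subsequences
theorem outerA (dic : List (String × String)) (cs : List Char) :
    cs.foldl (fun (st : List String × List String) c =>
      let current_candidates := st.1
      current_candidates.foldl (fun (st2 : List String × List String) prev =>
        let new_candidates := String.ofList (prev.toList ++ [c])
        let an2 := match List.lookup new_candidates dic with
          | some v => st2.2 ++ [v]
          | none => st2.2
        (st2.1 ++ [new_candidates], an2)) st) ([""], [])
    = ((List.range (2 ^ cs.length)).map (fun m => String.ofList (bitsSub cs m)),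
       (List.range' 1 (2 ^ cs.length - 1)).filterMap
         (fun m => List.lookup (String.ofList (bitsSub cs m)) dic)) := by
  induction cs using List.reverseRecOn with
  | nil => simp [bitsSub]
  | append_singleton cs c ih =>
    rw [List.foldl_append, ih]
    simp only [List.foldl_cons, List.foldl_nil]
    simp [innerA]
    have h2 : 2 ^ (cs.length + 1) = 2 ^ cs.length + 2 ^ cs.length := by ring
    have h1 : (1 : ℕ) ≤ 2 ^ cs.length := Nat.one_le_two_pow
    constructor
    · rw [h2, List.range_add, List.map_append, List.map_map]
      congr 1
      · exact (List.map_congr_left fun m hm =>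
          congrArg String.ofList (bitsSub_append_lt cs c m (List.mem_range.mp hm))).symm
      · refine (List.map_congr_left fun m hm => ?_).symm
        simp only [Function.comp_apply]
        rw [bitsSub_append_add cs c m (List.mem_range.mp hm)]
        simp
    · have h3 : 2 ^ (cs.length + 1) - 1 = (2 ^ cs.length - 1) + 2 ^ cs.length := by omega
      rw [h3, ← List.range'_append, List.filterMap_append]
      congr 1
      · refine (List.filterMap_congr fun m hm => ?_).symm
        have : m < 2 ^ cs.length := by
          have := (List.mem_range'_1.mp hm).2; omega
        rw [bitsSub_append_lt cs c m this]
      · have h4 : 1 + 1 * (2 ^ cs.length - 1) = 2 ^ cs.length := by omega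
        rw [h4, List.range'_eq_map_range, List.filterMap_map]
        refine (List.filterMap_congr fun m hm => ?_).symm
        simp only [Function.comp_apply]
        rw [bitsSub_append_add cs c m (List.mem_range.mp hm)]
        simp

theorem floordiv_two_natCast (m : ℕ) :
    PySem.Int.floordiv (m : Int) 2 = ((m / 2 : ℕ) : Int) := by
  simp [PySem.Int.floordiv, Int.fdiv_eq_ediv]

theorem mod_two_beq_natCast (m : ℕ) :
    (PySem.Int.mod (m : Int) 2 == 1) = decide (m % 2 = 1) := by
  have h : PySem.Int.mod (m : Int) 2 = ((m % 2 : ℕ) : Int) := by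
    simp [PySem.Int.mod, Int.fmod_eq_emod]
  rw [h]
  rcases Nat.mod_two_eq_zero_or_one m with h2 | h2 <;> simp [h2]

-- B's bit-decoding loop over the characters of s produces exactly bitsSub
theorem innerB (cs : List Char) (m : ℕ) (acc : List Char) :
    cs.foldl (fun (st : Int × List Char) c =>
        (PySem.Int.floordiv st.1 2,
         if PySem.Int.mod st.1 2 == 1 then st.2 ++ [c] else st.2)) ((m : Int), acc)
    = (((m / 2 ^ cs.length : ℕ) : Int), acc ++ bitsSub cs m) := by
  induction cs generalizing m acc with
  | nil => simp [bitsSub]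
  | cons c cs ih =>
    simp only [List.foldl_cons, floordiv_two_natCast, mod_two_beq_natCast, bitsSub]
    rw [ih]
    have hd : m / 2 / 2 ^ cs.length = m / 2 ^ (c :: cs).length := by
      rw [Nat.div_div_eq_div_mul, List.length_cons, pow_succ]; ring_nf
    rcases Nat.mod_two_eq_zero_or_one m with h2 | h2 <;> simp [h2, hd]

theorem foldl_match_append (dic : List (String × String)) (go : Int → String)
    (l : List Int) (acc : List String) :
    l.foldl (fun (a : List String) x =>
      match List.lookup (go x) dic with
      | some v => a ++ [v]
      | none => a) acc
    = acc ++ l.filterMap (fun x => List.lookup (go x) dic) := by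
  induction l generalizing acc with
  | nil => simp
  | cons x xs ih =>
    simp only [List.foldl_cons, List.filterMap_cons]
    cases h : List.lookup (go x) dic <;> simp [ih]

-- B's mask loop collects the same dictionary hits in the same order
theorem altB_an (dic : List (String × String)) (cs : List Char) :
    (PySem.List.pyRange 1 ((2 : Int) ^ cs.length) 1).foldl (fun (acc : List String) mask =>
      let p := cs.foldl (fun (st : Int × List Char) c =>
          (PySem.Int.floordiv st.1 2,
           if PySem.Int.mod st.1 2 == 1 then st.2 ++ [c] else st.2))
        (mask, ([] : List Char))
      let sub := String.ofList p.2
      match List.lookup sub dic with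
      | some v => acc ++ [v]
      | none => acc) []
    = (List.range' 1 (2 ^ cs.length - 1)).filterMap
        (fun m => List.lookup (String.ofList (bitsSub cs m)) dic) := by
  rw [PySem.List.foldl_congr_mem _ _
    (fun (acc : List String) mask =>
      match List.lookup (String.ofList (bitsSub cs mask.toNat)) dic with
      | some v => acc ++ [v]
      | none => acc) _ ?_]
  · rw [foldl_match_append dic (fun mask => String.ofList (bitsSub cs mask.toNat))]
    rw [PySem.List.pyRange_one, List.filterMap_map, List.nil_append]
    have hcast : ((2 : Int) ^ cs.length - 1).toNat = 2 ^ cs.length - 1 := by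
      have h : ((2 : Int) ^ cs.length) = ((2 ^ cs.length : ℕ) : Int) := by push_cast; ring
      rw [h]; omega
    rw [hcast, List.range'_eq_map_range, List.filterMap_map]
    refine List.filterMap_congr fun k hk => ?_
    have : ((1 : Int) + (k : ℕ)).toNat = 1 + k := by omega
    simp [this]
  · intro acc mask hmem
    have h0 : 0 ≤ mask := by
      have := (PySem.List.mem_pyRange_one.mp hmem).1; omega
    have hmask : ((mask.toNat : ℕ) : Int) = mask := Int.toNat_of_nonneg h0
    conv_lhs => rw [← hmask]
    simp only [innerB, List.nil_append]

theorem string_combination_solution_spec : Claim_equal_string_combination_solution := by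
  intro s dic _
  simp only [Spec_string_combination_solution, string_combination_solution,
    string_combination_solution_alt, consider_qu]
  rw [outerA, altB_an]
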